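-- pv_equiv track=rewrite | github.com/gyp0bt/xkep-cae | xkep_cae/io/inp_parser.py | _read_data_lines
-- ===== SOURCE A (Python) =====
-- def _read_data_lines(lines: list[str], start_idx: int) -> tuple[list[str], int]:
--     """キーワードに続くデータ行を全て読み取る.
--
--     Returns:
--         (data_lines, next_keyword_idx)
--     """
--     data: list[str] = []
--     idx = start_idx
--     n = len(lines)
--     while idx < n:
--         line = lines[idx].strip()
--         if not line or line.startswith("**"):
--             idx += 1
--             continue
--         if line.startswith("*"):
--             break
--         data.append(line)
--         idx += 1
--     return data, idx
-- ===== SOURCE B (Python) =====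
-- def _read_data_lines(lines: list[str], start_idx: int) -> tuple[list[str], int]:
--     """Two-pass version: first find the boundary (next keyword line), then
--     collect the data lines before it with a comprehension."""
--     n = len(lines)
--     boundary = start_idx
--     while boundary < n:
--         s = lines[boundary].strip()
--         if s.startswith("*") and not s.startswith("**"):
--             break
--         boundary += 1
--     data = [s for i in range(start_idx, boundary)
--             for s in (lines[i].strip(),)
--             if s and not s.startswith("**")]
--     return data, boundary
-- ===== Notes on version B (the rewrite author's own statement) =====
-- stated objective: alternative
-- what changed: Replaces the single interleaved skip/break/append loop by a boundary-finding scan followed by a separate filtering comprehension over the indices before the boundary.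
-- outside the precondition, e.g. on _read_data_lines([' x '], -2): A raises IndexError, B raises IndexError
import Mathlib
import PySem

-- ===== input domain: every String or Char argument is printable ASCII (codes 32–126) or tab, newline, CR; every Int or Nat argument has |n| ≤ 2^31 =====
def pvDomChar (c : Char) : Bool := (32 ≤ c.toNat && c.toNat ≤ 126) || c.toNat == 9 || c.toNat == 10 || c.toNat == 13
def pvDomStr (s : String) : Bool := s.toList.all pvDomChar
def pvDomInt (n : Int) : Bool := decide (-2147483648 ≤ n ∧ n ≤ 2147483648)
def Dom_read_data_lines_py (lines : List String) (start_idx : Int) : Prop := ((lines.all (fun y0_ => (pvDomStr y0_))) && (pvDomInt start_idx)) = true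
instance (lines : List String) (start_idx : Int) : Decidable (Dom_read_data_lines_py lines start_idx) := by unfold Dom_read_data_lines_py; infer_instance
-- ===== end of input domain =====

-- B replaces A's single interleaved skip/break/append loop by a boundary-finding
-- scan plus a separate filtering pass over the indices before the boundary
-- (objective: alternative decomposition, same cost).

-- ===== PORT A =====
-- A's while loop, fuel = number of remaining iterations (n - idx); 'fuel = 0' ↔ 'idx ≥ n'
def readAuxA (lines : List String) (fuel : Nat) (idx : Int) (data : List String) :
    List String × Int :=
  match fuel with
  | 0 => (data, idx)
  | fuel + 1 =>
    match PySem.List.pyGet? lines idx with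
    | none => (data, idx)   -- IndexError in Python; unreachable under Pre_
    | some l =>
      let line := PySem.Str.strip l
      if line = "" ∨ PySem.Str.startswith line "**" then
        readAuxA lines fuel (idx + 1) data
      else if PySem.Str.startswith line "*" then
        (data, idx)
      else
        readAuxA lines fuel (idx + 1) (data ++ [line])

def read_data_lines_py (lines : List String) (start_idx : Int) : List String × Int :=
  readAuxA lines ((lines.length : Int) - start_idx).toNat start_idx []

-- ===== PORT B =====
-- first pass of B: find the boundary index of the next keyword line (same fuel scheme)
def boundaryAux (lines : List String) (fuel : Nat) (idx : Int) : Int :=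
  match fuel with
  | 0 => idx
  | fuel + 1 =>
    match PySem.List.pyGet? lines idx with
    | none => idx           -- IndexError in Python; unreachable under Pre_
    | some l =>
      let s := PySem.Str.strip l
      if PySem.Str.startswith s "*" ∧ ¬ PySem.Str.startswith s "**" then idx
      else boundaryAux lines fuel (idx + 1)

-- second pass of B: the filtering comprehension over range(start_idx, boundary)
def keepLine (lines : List String) (i : Int) : Option String :=
  match PySem.List.pyGet? lines i with
  | none => none            -- IndexError in Python; unreachable under Pre_
  | some l =>
    let s := PySem.Str.strip l
    if s ≠ "" ∧ ¬ PySem.Str.startswith s "**" then some s else none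

def read_data_lines_py_alt (lines : List String) (start_idx : Int) : List String × Int :=
  let boundary := boundaryAux lines ((lines.length : Int) - start_idx).toNat start_idx
  let data := (PySem.List.pyRange start_idx boundary 1).filterMap (keepLine lines)
  (data, boundary)

-- ===== PRECONDITION & SPEC =====
-- A raises IndexError when the loop reaches lines[idx] with idx < -len(lines)
-- (Python negative indexing), i.e. exactly when start_idx < -len(lines); B raises there too.
def Pre_read_data_lines_py (lines : List String) (start_idx : Int) : Prop :=
  -(lines.length : Int) ≤ start_idx
instance (lines : List String) (start_idx : Int) : Decidable (Pre_read_data_lines_py lines start_idx) := by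
  unfold Pre_read_data_lines_py; infer_instance
def pvWitness_read_data_lines_py : List String × Int := ([" a ", "** c", "*KW"], 0)

def Spec_read_data_lines_py (lines : List String) (start_idx : Int) (out : List String × Int) : Prop := out = read_data_lines_py_alt lines start_idx
instance (lines : List String) (start_idx : Int) (out : List String × Int) : Decidable (Spec_read_data_lines_py lines start_idx out) := by unfold Spec_read_data_lines_py; infer_instance

-- ===== CLAIM (what is proved, stated in full; the proofs are below) =====
def Claim_equal_read_data_lines_py : Prop := ∀ (lines : List String) (start_idx : Int), Dom_read_data_lines_py lines start_idx → Pre_read_data_lines_py lines start_idx → Spec_read_data_lines_py lines start_idx (read_data_lines_py lines start_idx)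

-- ===== LEMMAS AND PROOFS =====

theorem boundaryAux_ge (lines : List String) :
    ∀ (fuel : Nat) (idx : Int), idx ≤ boundaryAux lines fuel idx := by
  intro fuel
  induction fuel with
  | zero => intro idx; simp [boundaryAux]
  | succ fuel ih =>
    intro idx
    unfold boundaryAux
    cases hg : PySem.List.pyGet? lines idx with
    | none => simp
    | some l =>
      simp only
      split
      · simp
      · have := ih (idx + 1); omega

theorem readAuxA_eq (lines : List String) :
    ∀ (fuel : Nat) (idx : Int) (data : List String),
    readAuxA lines fuel idx data =
      (data ++ (PySem.List.pyRange idx (boundaryAux lines fuel idx) 1).filterMap (keepLine lines),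
       boundaryAux lines fuel idx) := by
  intro fuel
  induction fuel with
  | zero =>
    intro idx data
    unfold readAuxA boundaryAux
    rw [PySem.List.pyRange_one_eq_nil (le_refl idx)]
    simp
  | succ fuel ih =>
    intro idx data
    unfold readAuxA boundaryAux
    cases hg : PySem.List.pyGet? lines idx with
    | none =>
      simp only
      rw [PySem.List.pyRange_one_eq_nil (le_refl idx)]
      simp
    | some l =>
      simp only
      by_cases h1 : PySem.Str.strip l = "" ∨ PySem.Str.startswith (PySem.Str.strip l) "**" = true
      · -- skip branch: the boundary scan skips this index too
        have hbcond : ¬ (PySem.Str.startswith (PySem.Str.strip l) "*" = true ∧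
            ¬ PySem.Str.startswith (PySem.Str.strip l) "**" = true) := by
          rcases h1 with h1 | h1
          · rw [h1]; decide
          · exact fun hc => hc.2 h1
        rw [if_pos h1, if_neg hbcond, ih (idx + 1) data]
        have hb1 : idx + 1 ≤ boundaryAux lines fuel (idx + 1) := boundaryAux_ge lines _ _
        rw [show PySem.List.pyRange idx (boundaryAux lines fuel (idx + 1)) 1
              = idx :: PySem.List.pyRange (idx + 1) (boundaryAux lines fuel (idx + 1)) 1
            from PySem.List.pyRange_one_cons (by omega)]
        have hk : keepLine lines idx = none := by
          unfold keepLine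
          rw [hg]
          simp only
          rw [if_neg]
          rintro ⟨hne, hn2⟩
          rcases h1 with h1 | h1
          · exact hne h1
          · exact hn2 h1
        simp [hk]
      · rw [if_neg h1]
        rw [not_or] at h1
        obtain ⟨hne, hn2⟩ := h1
        by_cases h2 : PySem.Str.startswith (PySem.Str.strip l) "*" = true
        · -- break branch: the boundary is this index, so the range is empty
          rw [if_pos h2, if_pos ⟨h2, hn2⟩]
          rw [PySem.List.pyRange_one_eq_nil (le_refl idx)]
          simp
        · -- data branch: this index is kept by the filtering pass
          rw [if_neg h2, if_neg (fun hc => h2 hc.1), ih (idx + 1) (data ++ [PySem.Str.strip l])]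
          have hb1 : idx + 1 ≤ boundaryAux lines fuel (idx + 1) := boundaryAux_ge lines _ _
          rw [show PySem.List.pyRange idx (boundaryAux lines fuel (idx + 1)) 1
                = idx :: PySem.List.pyRange (idx + 1) (boundaryAux lines fuel (idx + 1)) 1
              from PySem.List.pyRange_one_cons (by omega)]
          have hk : keepLine lines idx = some (PySem.Str.strip l) := by
            unfold keepLine
            rw [hg]
            simp only
            rw [if_pos ⟨hne, hn2⟩]
          simp [hk]

-- ===== VERDICT (by name: the statement is the Claim_ definition above) =====
theorem read_data_lines_py_spec : Claim_equal_read_data_lines_py := by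
  intro lines start_idx _ _
  unfold Spec_read_data_lines_py read_data_lines_py read_data_lines_py_alt
  rw [readAuxA_eq lines (((lines.length : Int) - start_idx).toNat) start_idx []]
  simp
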